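-- pv_equiv track=rewrite | github.com/maria-becker/Moralization | Annotation Analysis Tools/data_analysis/label_filtering.py | multi_role_combinations
-- ===== SOURCE A (Python) =====
-- def multi_role_combinations(double_role_output):
--     """
--     This function returns the distribution of the different possible
--     combinations where one protagonist has multiple roles.
--
--     Parameters:
--         double_role_output: dictionary as created by multi_role_protagonists()
--     Returns:
--     Returns:
--         Dictionary. Keys are the possible combinations, where
--         -A stands for 'Adressat'
--         -B stands for 'Benefizient'
--         -F stands for 'Forderer'
--         The values are the absolute frequencies of the combinations.
--     """
--
--     distribution_dict = {"A+B": 0, "A+F": 0, "B+F": 0, "A+B+F": 0, "error": 0}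
--     for info in double_role_output.values():
--         if "Adresassat:in" in info:
--             if "Benefizient:in" in info:
--                 if "Forderer:in" in info:
--                     distribution_dict["A+B+F"] += 1
--                     continue
--                 distribution_dict["A+B"] += 1
--                 continue
--             if "Forderer:in" in info:
--                 distribution_dict["A+F"] += 1
--                 continue
--         elif "Benefizient:in" in info:
--             if "Forderer:in" in info:
--                 distribution_dict["B+F"] += 1
--                 continue
--             else:
--                 distribution_dict["error"] += 1
--         else:
--             distribution_dict["error"] += 1
--
--     return distribution_dict
-- ===== SOURCE B (Python) =====
-- def multi_role_combinations(double_role_output):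
--     # Staged-passes version: first map every value to its combination label
--     # (a '+'-joined string of role letters; None for the uncounted
--     # Adressat-only case, 'error' for fewer than two roles otherwise),
--     # then build the result by counting each label in the label list.
--     role_letters = [("A", "Adresassat:in"), ("B", "Benefizient:in"), ("F", "Forderer:in")]
--
--     def label(info):
--         letters = [letter for letter, role in role_letters if role in info]
--         if len(letters) >= 2:
--             return "+".join(letters)
--         return None if letters == ["A"] else "error"
--
--     labels = [label(info) for info in double_role_output.values()]
--     return {key: labels.count(key) for key in ("A+B", "A+F", "B+F", "A+B+F", "error")}
-- ===== Notes on version B (the rewrite author's own statement) =====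
-- stated objective: simpler
-- what changed: Replaces the single-pass nested if/elif/continue accumulator loop by two staged passes: map each value to a '+'-joined combination label (None for the uncounted Adressat-only case), then build the dict by counting each of the five labels in that list.
import Mathlib
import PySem

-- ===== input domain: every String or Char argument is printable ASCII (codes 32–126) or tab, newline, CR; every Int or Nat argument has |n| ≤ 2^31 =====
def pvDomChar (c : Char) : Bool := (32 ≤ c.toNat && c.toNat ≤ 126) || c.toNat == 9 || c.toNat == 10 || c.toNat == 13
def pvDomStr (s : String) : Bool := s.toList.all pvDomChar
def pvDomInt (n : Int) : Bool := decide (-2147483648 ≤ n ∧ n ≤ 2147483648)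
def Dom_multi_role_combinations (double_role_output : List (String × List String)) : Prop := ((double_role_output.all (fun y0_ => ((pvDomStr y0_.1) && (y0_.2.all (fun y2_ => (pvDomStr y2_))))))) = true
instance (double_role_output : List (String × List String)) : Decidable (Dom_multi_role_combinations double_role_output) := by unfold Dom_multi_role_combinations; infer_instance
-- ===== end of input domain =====

-- B replaces A's single pass with a nested if/elif accumulator dict by two staged passes:
-- map every value to a '+'-joined combination label, then count each of the five labels
-- (objective: simpler decomposition, same cost).


-- ===== PORT A =====
-- one iteration of A's for-loop: the nested if/elif cascade with its continues
def mrcStepA (d : PySem.Dict String Int) (info : List String) : PySem.Dict String Int :=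
  if info.contains "Adresassat:in" then
    if info.contains "Benefizient:in" then
      if info.contains "Forderer:in" then d.modify "A+B+F" 0 (· + 1)
      else d.modify "A+B" 0 (· + 1)
    else
      if info.contains "Forderer:in" then d.modify "A+F" 0 (· + 1)
      else d
  else
    if info.contains "Benefizient:in" then
      if info.contains "Forderer:in" then d.modify "B+F" 0 (· + 1)
      else d.modify "error" 0 (· + 1)
    else d.modify "error" 0 (· + 1)

def multi_role_combinations (double_role_output : List (String × List String)) : List (String × Int) :=
  (((PySem.Dict.ofList double_role_output).values).foldl mrcStepA
    (PySem.Dict.ofList [("A+B", 0), ("A+F", 0), ("B+F", 0), ("A+B+F", 0), ("error", 0)])).items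

-- ===== PORT B =====
-- Source B's role_letters table
def mrcRoleLetters : List (String × String) := [("A", "Adresassat:in"), ("B", "Benefizient:in"), ("F", "Forderer:in")]

-- Source B's label(info): '+'-joined letters of the present roles; none = uncounted A-only case
def mrcLabel (info : List String) : Option String :=
  let letters := (mrcRoleLetters.filter (fun p => info.contains p.2)).map (·.1)
  if letters.length ≥ 2 then some (PySem.Str.join "+" letters)
  else if letters = ["A"] then none else some "error"

def multi_role_combinations_alt (double_role_output : List (String × List String)) : List (String × Int) :=
  let labels := ((PySem.Dict.ofList double_role_output).values).map mrcLabel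
  [("A+B", (labels.count (some "A+B") : Int)),
   ("A+F", (labels.count (some "A+F") : Int)),
   ("B+F", (labels.count (some "B+F") : Int)),
   ("A+B+F", (labels.count (some "A+B+F") : Int)),
   ("error", (labels.count (some "error") : Int))]

-- ===== PRECONDITION & SPEC =====
def Spec_multi_role_combinations (double_role_output : List (String × List String)) (out : List (String × Int)) : Prop := out = multi_role_combinations_alt double_role_output
instance (double_role_output : List (String × List String)) (out : List (String × Int)) : Decidable (Spec_multi_role_combinations double_role_output out) := by unfold Spec_multi_role_combinations; infer_instance

-- ===== CLAIM (what is proved, stated in full; the proofs are below) =====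
def Claim_equal_multi_role_combinations : Prop := ∀ (double_role_output : List (String × List String)), Dom_multi_role_combinations double_role_output → Spec_multi_role_combinations double_role_output (multi_role_combinations double_role_output)

-- ===== LEMMAS AND PROOFS =====
-- one A-step is: increment the counter named by B's label (no-op on none)
theorem mrcStepA_eq_label (d : PySem.Dict String Int) (info : List String) :
    mrcStepA d info = match mrcLabel info with
      | some k => d.modify k 0 (· + 1)
      | none => d := by
  cases h1 : info.contains "Adresassat:in" <;>
    cases h2 : info.contains "Benefizient:in" <;>
      cases h3 : info.contains "Forderer:in" <;>
        · simp only [mrcStepA, mrcLabel, mrcRoleLetters, List.filter, h1, h2, h3]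
          rfl

-- the loop invariant: folding A's step over any value list onto the five-counter dict
-- yields exactly the five label counts added to the running counters
theorem mrc_fold_items (xs : List (List String)) : ∀ (a b c d e : Int),
    (xs.foldl mrcStepA (PySem.Dict.mk [("A+B", a), ("A+F", b), ("B+F", c), ("A+B+F", d), ("error", e)])).items
    = [("A+B", a + ((xs.map mrcLabel).count (some "A+B") : Int)),
       ("A+F", b + ((xs.map mrcLabel).count (some "A+F") : Int)),
       ("B+F", c + ((xs.map mrcLabel).count (some "B+F") : Int)),
       ("A+B+F", d + ((xs.map mrcLabel).count (some "A+B+F") : Int)),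
       ("error", e + ((xs.map mrcLabel).count (some "error") : Int))] := by
  induction xs with
  | nil => intro a b c d e; simp
  | cons hd tl ih =>
    intro a b c d e
    rw [List.foldl_cons, mrcStepA_eq_label]
    cases h1 : hd.contains "Adresassat:in" <;>
      cases h2 : hd.contains "Benefizient:in" <;>
        cases h3 : hd.contains "Forderer:in" <;>
          · simp only [mrcLabel, mrcRoleLetters, h1, h2, h3, List.filter, List.map_cons,
              List.count_cons]
            simp [PySem.Dict.modify, PySem.Dict.insert, PySem.Dict.get?, PySem.Dict.getD, ih,
              show PySem.Str.join "+" ["A", "B"] = "A+B" from by decide,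
              show PySem.Str.join "+" ["A", "F"] = "A+F" from by decide,
              show PySem.Str.join "+" ["B", "F"] = "B+F" from by decide,
              show PySem.Str.join "+" ["A", "B", "F"] = "A+B+F" from by decide]
            try omega

-- ===== VERDICT (by name: the statement is the Claim_ definition above) =====
theorem multi_role_combinations_spec : Claim_equal_multi_role_combinations := by
  intro dro _
  unfold Spec_multi_role_combinations multi_role_combinations multi_role_combinations_alt
  rw [show (PySem.Dict.ofList [("A+B", (0:Int)), ("A+F", 0), ("B+F", 0), ("A+B+F", 0), ("error", 0)])
      = PySem.Dict.mk [("A+B", 0), ("A+F", 0), ("B+F", 0), ("A+B+F", 0), ("error", 0)] from rfl,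
    mrc_fold_items]
  simp
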